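-- pv_equiv track=rewrite | github.com/pypi-data/pypi-mirror-35 | packages/prawframe/prawframe-0.0.1-py3-none-any.whl/prawframe/schedules.py | minute_schedule
-- ===== SOURCE A (Python) =====
-- def minute_schedule(m, mins=10):
--     a = int(60 / mins)
--     low = 0
--     high = low + 5
--     out = []
--     for i in range(a):
--         out.append((m >= low and m <= high))
--         low += mins
--         high = low + 5
--     return out
-- ===== SOURCE B (Python) =====
-- def minute_schedule(m, mins=10):
--     a = int(60 / mins)
--     if a <= 0:
--         return []
--     lo = max(0, -((-(m - 5)) // mins))      # ceil((m-5)/mins)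
--     hi = min(a - 1, m // mins)              # floor(m/mins)
--     if lo > hi:
--         return [False] * a
--     return [False] * lo + [True] * (hi - lo + 1) + [False] * (a - 1 - hi)
-- ===== Notes on version B (the rewrite author's own statement) =====
-- stated objective: simpler
-- what changed: B computes the contiguous True index block in closed form (lo = ceil((m-5)/mins), hi = floor(m/mins), clamped) and builds the list by replication/concatenation instead of looping over all slots comparing m against running low/high bounds.
import Mathlib
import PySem

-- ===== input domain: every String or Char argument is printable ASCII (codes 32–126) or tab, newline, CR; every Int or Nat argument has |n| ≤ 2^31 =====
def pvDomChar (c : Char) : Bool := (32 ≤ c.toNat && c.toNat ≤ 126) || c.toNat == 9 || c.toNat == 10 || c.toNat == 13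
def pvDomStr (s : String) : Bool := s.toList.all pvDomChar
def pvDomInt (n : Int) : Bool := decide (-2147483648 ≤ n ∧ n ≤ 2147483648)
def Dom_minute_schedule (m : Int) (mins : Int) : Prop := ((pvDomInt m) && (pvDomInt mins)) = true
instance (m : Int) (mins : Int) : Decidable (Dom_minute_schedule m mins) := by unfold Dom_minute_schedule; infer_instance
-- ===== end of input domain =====

-- B replaces the per-slot comparison loop by a closed-form True block (ceil/floor bounds) built with replicate/append; objective: simpler.

-- ===== PORT A =====
-- a = int(60 / mins): for an integer mins ≠ 0 this is exactly truncation toward zero, Int.tdiv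
def minute_schedule (m : Int) (mins : Int) : List Bool :=
  let a : Int := Int.tdiv 60 mins
  (((PySem.List.pyRange 0 a 1).foldl
      (fun (st : List Bool × Int × Int) _ =>
        let out := st.1
        let low := st.2.1
        let high := st.2.2
        (out ++ [decide (m ≥ low ∧ m ≤ high)], low + mins, (low + mins) + 5))
      ([], 0, 0 + 5))).1

-- ===== PORT B =====
def minute_schedule_alt (m : Int) (mins : Int) : List Bool :=
  let a : Int := Int.tdiv 60 mins
  if a ≤ 0 then []
  else
    let lo : Int := max 0 (-(PySem.Int.floordiv (-(m - 5)) mins))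
    let hi : Int := min (a - 1) (PySem.Int.floordiv m mins)
    if lo > hi then List.replicate a.toNat false
    else List.replicate lo.toNat false ++ List.replicate (hi - lo + 1).toNat true
          ++ List.replicate (a - 1 - hi).toNat false

-- ===== PRECONDITION & SPEC =====
-- Python raises ZeroDivisionError at mins = 0
def Pre_minute_schedule (m : Int) (mins : Int) : Prop := mins ≠ 0
instance (m : Int) (mins : Int) : Decidable (Pre_minute_schedule m mins) := by unfold Pre_minute_schedule; infer_instance
def pvWitness_minute_schedule : Int × Int := (7, 10)

def Spec_minute_schedule (m : Int) (mins : Int) (out : List Bool) : Prop := out = minute_schedule_alt m mins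
instance (m : Int) (mins : Int) (out : List Bool) : Decidable (Spec_minute_schedule m mins out) := by unfold Spec_minute_schedule; infer_instance

-- ===== CLAIM =====
def Claim_equal_minute_schedule : Prop := ∀ (m : Int) (mins : Int), Dom_minute_schedule m mins → Pre_minute_schedule m mins → Spec_minute_schedule m mins (minute_schedule m mins)

-- ===== LEMMAS AND PROOFS =====

-- The A-loop ignores the range elements: unfold it to a map over indices.
theorem msA_loop (m mins : Int) (l : List Int) (out : List Bool) (low : Int) :
    ((l.foldl
      (fun (st : List Bool × Int × Int) _ =>
        (st.1 ++ [decide (m ≥ st.2.1 ∧ m ≤ st.2.2)], st.2.1 + mins, (st.2.1 + mins) + 5))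
      (out, low, low + 5))).1
    = out ++ (List.range l.length).map
        (fun (i : Nat) => decide (low + (i : Int) * mins ≤ m ∧ m ≤ low + (i : Int) * mins + 5)) := by
  induction l generalizing out low with
  | nil => simp
  | cons x xs ih =>
      simp only [List.foldl_cons]
      rw [ih]
      have hmap : (List.range (xs.length + 1)).map
          (fun (i : Nat) => decide (low + (i : Int) * mins ≤ m ∧ m ≤ low + (i : Int) * mins + 5))
        = decide (low ≤ m ∧ m ≤ low + 5) ::
          (List.range xs.length).map
          (fun (i : Nat) => decide ((low + mins) + (i : Int) * mins ≤ m ∧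
                            m ≤ (low + mins) + (i : Int) * mins + 5)) := by
        rw [List.range_succ_eq_map, List.map_cons, List.map_map]
        refine congrArg₂ _ (by norm_num) ?_
        apply List.map_congr_left
        intro i _
        simp only [Function.comp_apply]
        rw [decide_eq_decide]
        push_cast
        have h : low + ((i : Int) + 1) * mins = (low + mins) + (i : Int) * mins := by ring
        rw [h]
      simp only [List.length_cons, hmap]
      simp [ge_iff_le]

theorem minute_schedule_eq_map (m mins : Int) :
    minute_schedule m mins
      = (List.range (Int.tdiv 60 mins).toNat).map
          (fun (i : Nat) => decide ((i : Int) * mins ≤ m ∧ m ≤ (i : Int) * mins + 5)) := by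
  unfold minute_schedule
  rw [msA_loop m mins _ [] 0]
  simp [PySem.List.length_pyRange_one]

-- The characteristic list of a clamped interval, built by replicate/append.
theorem block_eq_map (lo hi a : Int) (n : Nat) (hn : (n : Int) = a) (h0 : 0 ≤ lo)
    (hh : hi ≤ a - 1) :
    (if lo > hi then List.replicate n false
     else List.replicate lo.toNat false ++ List.replicate (hi - lo + 1).toNat true
          ++ List.replicate (a - 1 - hi).toNat false)
    = (List.range n).map (fun (i : Nat) => decide (lo ≤ (i : Int) ∧ (i : Int) ≤ hi)) := by
  apply List.ext_getElem
  · split_ifs with hgt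
    · simp
    · simp only [List.length_append, List.length_replicate, List.length_map, List.length_range]
      omega
  · intro i h1 h2
    simp only [List.length_map, List.length_range] at h2
    split_ifs with hgt
    · simp only [List.getElem_replicate, List.getElem_map, List.getElem_range]
      have : ¬ (lo ≤ (i : Int) ∧ (i : Int) ≤ hi) := by omega
      simp [this]
    · simp only [List.getElem_map, List.getElem_range, List.append_assoc]
      rcases Nat.lt_or_ge i lo.toNat with hc | hc
      · rw [List.getElem_append_left (by simp only [List.length_replicate]; exact hc)]
        have : ¬ (lo ≤ (i : Int) ∧ (i : Int) ≤ hi) := by omega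
        simp [this]
      · rw [List.getElem_append_right (by simp only [List.length_replicate]; exact hc)]
        simp only [List.length_replicate]
        rcases Nat.lt_or_ge (i - lo.toNat) (hi - lo + 1).toNat with hd | hd
        · rw [List.getElem_append_left (by simp only [List.length_replicate]; exact hd)]
          have : lo ≤ (i : Int) ∧ (i : Int) ≤ hi := by omega
          simp [this]
        · rw [List.getElem_append_right (by simp only [List.length_replicate]; exact hd)]
          have : ¬ (lo ≤ (i : Int) ∧ (i : Int) ≤ hi) := by omega
          simp [this]

theorem minute_schedule_spec : Claim_equal_minute_schedule := by
  intro m mins _ hmins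
  unfold Spec_minute_schedule
  rw [minute_schedule_eq_map]
  unfold minute_schedule_alt
  by_cases ha : Int.tdiv 60 mins ≤ 0
  · simp [ha, Int.toNat_of_nonpos ha]
  · rw [not_le] at ha
    have hmpos : 0 < mins := by
      by_contra hneg
      rw [not_lt] at hneg
      have hne : mins < 0 := lt_of_le_of_ne hneg hmins
      have h := Int.tdiv_nonneg (a := (60 : Int)) (b := -mins) (by norm_num) (by omega)
      rw [Int.tdiv_neg] at h
      omega
    simp only [if_neg (by omega : ¬ Int.tdiv 60 mins ≤ 0)]
    set a : Int := Int.tdiv 60 mins with haa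
    have hcast : ((a.toNat : Int)) = a := Int.toNat_of_nonneg (by omega)
    rw [block_eq_map _ _ a a.toNat hcast (by omega) (by omega)]
    apply List.map_congr_left
    intro i hi
    simp only [List.mem_range] at hi
    rw [decide_eq_decide]
    have hia : (i : Int) ≤ a - 1 := by omega
    have h1 : (i : Int) ≤ PySem.Int.floordiv m mins ↔ (i : Int) * mins ≤ m :=
      PySem.Int.le_floordiv_iff_mul_le hmpos
    have h2 : -(PySem.Int.floordiv (-(m - 5)) mins) ≤ (i : Int) ↔ m - 5 ≤ (i : Int) * mins := by
      rw [neg_le, PySem.Int.le_floordiv_iff_mul_le hmpos]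
      constructor <;> intro h <;> nlinarith
    obtain ⟨p, hp⟩ : ∃ p, (i : Int) * mins = p := ⟨_, rfl⟩
    rw [hp] at h1 h2 ⊢
    omega
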